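-- pv_equiv track=rewrite | github.com/ToxicDev-Patryk/Encrypted-Messenger | main.py | custom_decrypt
-- ===== SOURCE A (Python) =====
-- def generate_key_schedule(key):
--     key_schedule = []
--     for i in range(len(key)):
--         key_schedule.append(ord(key[i]) + i)
--     for i in range(len(key), 256):
--         key_schedule.append((key_schedule[i - len(key)] + key_schedule[i - 1]) % 256)
--     return key_schedule
--
-- def custom_decrypt(ciphertext, key):
--     key_schedule = generate_key_schedule(key)
--     ciphertext = ciphertext[::-1]
--     decrypted = []
--     for round in range(2, -1, -1):
--         temp = []
--         for i, char in enumerate(ciphertext):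
--             key_c = key_schedule[(i + round) % len(key_schedule)]
--             ciphertext_c = ord(char)
--             temp.append(chr((ciphertext_c ^ key_c) % 256))
--         ciphertext = ''.join(temp)
--     return ciphertext
-- ===== SOURCE B (Python) =====
-- def generate_key_schedule(key):
--     key_schedule = []
--     for i in range(len(key)):
--         key_schedule.append(ord(key[i]) + i)
--     for i in range(len(key), 256):
--         key_schedule.append((key_schedule[i - len(key)] + key_schedule[i - 1]) % 256)
--     return key_schedule
--
-- def custom_decrypt(ciphertext, key):
--     ks = generate_key_schedule(key)
--     n = len(ks)
--     out = []
--     for i, ch in enumerate(reversed(ciphertext)):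
--         out.append(chr((ord(ch) ^ ks[(i + 2) % n] ^ ks[(i + 1) % n] ^ ks[i % n]) % 256))
--     return ''.join(out)
-- ===== Notes on version B (the rewrite author's own statement) =====
-- stated objective: simpler
-- what changed: B folds A's three sequential XOR rounds (each a full pass with an intermediate %256-masked string) into one single pass that XORs each reversed-ciphertext character with all three key-schedule bytes at once, exact because masking low 8 bits distributes over XOR.
import Mathlib
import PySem

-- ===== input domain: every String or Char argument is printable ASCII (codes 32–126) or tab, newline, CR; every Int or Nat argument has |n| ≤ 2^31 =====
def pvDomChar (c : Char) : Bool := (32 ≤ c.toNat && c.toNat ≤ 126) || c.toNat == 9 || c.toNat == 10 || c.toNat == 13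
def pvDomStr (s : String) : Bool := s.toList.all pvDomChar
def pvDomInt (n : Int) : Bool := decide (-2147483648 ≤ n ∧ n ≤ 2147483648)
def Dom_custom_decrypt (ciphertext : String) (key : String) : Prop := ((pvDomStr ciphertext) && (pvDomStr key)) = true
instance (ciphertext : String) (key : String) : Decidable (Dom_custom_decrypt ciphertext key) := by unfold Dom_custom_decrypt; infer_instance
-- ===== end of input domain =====

-- B replaces A's three XOR rounds (each building an intermediate %256-masked string) by one
-- pass that XORs each character with the three key-schedule values at once (simpler; exact
-- because taking the low 8 bits commutes with XOR).

-- ===== PORT A =====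
-- shared helper, identical in both Pythons (A and B keep generate_key_schedule unchanged)
def generate_key_schedule (key : String) : List Int :=
  let ks1 := (List.range key.toList.length).foldl
    (fun acc i => acc ++ [((key.toList.getD i ' ').toNat : Int) + (i : Int)]) ([] : List Int)
  (PySem.List.pyRange (key.toList.length : Int) 256 1).foldl
    (fun acc i => acc ++ [PySem.Int.mod
      (PySem.List.pyGetD acc (i - (key.toList.length : Int)) 0 + PySem.List.pyGetD acc (i - 1) 0) 256]) ks1

def custom_decrypt (ciphertext : String) (key : String) : String :=
  let key_schedule := generate_key_schedule key
  let ct := ciphertext.toList.reverse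
  String.mk ((PySem.List.pyRange 2 (-1) (-1)).foldl (fun ct r =>
    (PySem.List.enumerate ct 0).foldl (fun temp p =>
      let key_c := PySem.List.pyGetD key_schedule (PySem.Int.mod (p.1 + r) (key_schedule.length : Int)) 0
      let ciphertext_c : Int := (p.2.toNat : Int)
      temp ++ [Char.ofNat (PySem.Int.mod (PySem.Int.bxor ciphertext_c key_c) 256).toNat]) []) ct)

-- ===== PORT B =====
def custom_decrypt_alt (ciphertext : String) (key : String) : String :=
  let ks := generate_key_schedule key
  let n : Int := ks.length
  String.mk ((PySem.List.enumerate ciphertext.toList.reverse 0).foldl (fun out p =>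
    out ++ [Char.ofNat (PySem.Int.mod
      (PySem.Int.bxor (PySem.Int.bxor (PySem.Int.bxor ((p.2.toNat : Int))
        (PySem.List.pyGetD ks (PySem.Int.mod (p.1 + 2) n) 0))
        (PySem.List.pyGetD ks (PySem.Int.mod (p.1 + 1) n) 0))
        (PySem.List.pyGetD ks (PySem.Int.mod p.1 n) 0)) 256).toNat]) [])

-- ===== PRECONDITION & SPEC =====
-- Pre_ excludes only the empty key, on which Python's generate_key_schedule raises IndexError.
def Pre_custom_decrypt (ciphertext : String) (key : String) : Prop := key ≠ ""
instance (ciphertext : String) (key : String) : Decidable (Pre_custom_decrypt ciphertext key) := by unfold Pre_custom_decrypt; infer_instance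
def pvWitness_custom_decrypt : String × String := ("abc", "k")
def Spec_custom_decrypt (ciphertext : String) (key : String) (out : String) : Prop := out = custom_decrypt_alt ciphertext key
instance (ciphertext : String) (key : String) (out : String) : Decidable (Spec_custom_decrypt ciphertext key out) := by unfold Spec_custom_decrypt; infer_instance

-- ===== CLAIM (what is proved, stated in full; the proofs are below) =====
def Claim_equal_custom_decrypt : Prop := ∀ (ciphertext : String) (key : String), Dom_custom_decrypt ciphertext key → Pre_custom_decrypt ciphertext key → Spec_custom_decrypt ciphertext key (custom_decrypt ciphertext key)

-- ===== LEMMAS AND PROOFS =====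

theorem pv_pyGetD_nonneg (l : List Int) (i : Int) (h : ∀ x ∈ l, 0 ≤ x) :
    0 ≤ PySem.List.pyGetD l i 0 := by
  unfold PySem.List.pyGetD
  cases hg : PySem.List.pyGet? l i with
  | none => simp
  | some a =>
    have ha : a ∈ l := by
      simp only [PySem.List.pyGet?, Option.bind_eq_some_iff] at hg
      obtain ⟨k, -, hk⟩ := hg
      exact List.mem_of_getElem? hk
    simpa using h a ha

theorem pv_ks_fold_nonneg (m : Int) (l : List Int) (acc : List Int) (h : ∀ x ∈ acc, 0 ≤ x) :
    ∀ x ∈ l.foldl (fun acc i => acc ++ [PySem.Int.mod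
      (PySem.List.pyGetD acc (i - m) 0 + PySem.List.pyGetD acc (i - 1) 0) 256]) acc, 0 ≤ x := by
  induction l generalizing acc with
  | nil => simpa using h
  | cons a l ih =>
    simp only [List.foldl_cons]
    refine ih _ ?_
    intro x hx
    rcases List.mem_append.1 hx with hx | hx
    · exact h x hx
    · simp only [List.mem_singleton] at hx
      subst hx
      exact PySem.Int.mod_nonneg _ (by norm_num)

theorem pv_ks_nonneg (key : String) : ∀ x ∈ generate_key_schedule key, 0 ≤ x := by
  unfold generate_key_schedule
  refine pv_ks_fold_nonneg _ _ _ ?_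
  rw [PySem.List.foldl_append_singleton_eq_map]
  intro x hx
  simp only [List.nil_append, List.mem_map] at hx
  obtain ⟨i, -, rfl⟩ := hx
  positivity

-- Python round-trip chr(v % 256) then ord: the low byte survives unchanged.
theorem pv_rt (x : Int) : ((Char.ofNat (PySem.Int.mod x 256).toNat).toNat : Int) = PySem.Int.mod x 256 := by
  have h0 : 0 ≤ PySem.Int.mod x 256 := PySem.Int.mod_nonneg _ (by norm_num)
  have h1 : PySem.Int.mod x 256 < 256 := PySem.Int.mod_lt _ (by norm_num)
  rw [Char.toNat_ofNat, if_pos (Or.inl (by omega))]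
  exact Int.toNat_of_nonneg h0

theorem pv_bxor_nonneg {a b : Int} (ha : 0 ≤ a) (hb : 0 ≤ b) : 0 ≤ PySem.Int.bxor a b := by
  rw [PySem.Int.bxor_of_nonneg ha hb]; exact Int.natCast_nonneg _

-- masking the low 8 bits commutes with XOR
theorem pv_mask (x k : Int) (hx : 0 ≤ x) (hk : 0 ≤ k) :
    PySem.Int.mod (PySem.Int.bxor (PySem.Int.mod x 256) k) 256
      = PySem.Int.mod (PySem.Int.bxor x k) 256 := by
  obtain ⟨a, rfl⟩ := Int.eq_ofNat_of_zero_le hx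
  obtain ⟨b, rfl⟩ := Int.eq_ofNat_of_zero_le hk
  have h256 : ((256 : Nat) : Int) = 256 := by norm_num
  rw [← h256, PySem.Int.mod_natCast, PySem.Int.bxor_natCast, PySem.Int.bxor_natCast,
    PySem.Int.mod_natCast, PySem.Int.mod_natCast]
  congr 1
  have : (256 : Nat) = 2 ^ 8 := by norm_num
  rw [this]
  apply Nat.eq_of_testBit_eq
  intro i
  simp only [Nat.testBit_mod_two_pow, Nat.testBit_xor]
  by_cases h : i < 8 <;> simp [h]

theorem pv_chain (c k2 k1 k0 : Int) (hc : 0 ≤ c) (h2 : 0 ≤ k2) (h1 : 0 ≤ k1) (h0 : 0 ≤ k0) :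
    Char.ofNat (PySem.Int.mod (PySem.Int.bxor
      ((Char.ofNat (PySem.Int.mod (PySem.Int.bxor
        ((Char.ofNat (PySem.Int.mod (PySem.Int.bxor c k2) 256).toNat).toNat : Int) k1) 256).toNat).toNat : Int)
      k0) 256).toNat
    = Char.ofNat (PySem.Int.mod (PySem.Int.bxor (PySem.Int.bxor (PySem.Int.bxor c k2) k1) k0) 256).toNat := by
  rw [pv_rt (PySem.Int.bxor c k2), pv_mask _ _ (pv_bxor_nonneg hc h2) h1,
    pv_rt (PySem.Int.bxor (PySem.Int.bxor c k2) k1),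
    pv_mask _ _ (pv_bxor_nonneg (pv_bxor_nonneg hc h2) h1) h0]

theorem pv_rounds : PySem.List.pyRange 2 (-1) (-1) = [2, 1, 0] := by decide

-- ===== VERDICT (by name: the statement is the Claim_ definition above) =====
set_option maxRecDepth 4000 in
theorem custom_decrypt_spec : Claim_equal_custom_decrypt := by
  intro ciphertext key _ _
  unfold Spec_custom_decrypt custom_decrypt custom_decrypt_alt
  rw [pv_rounds]
  simp only [List.foldl_cons, List.foldl_nil,
    PySem.List.foldl_append_singleton_eq_map (acc := ([] : List Char)), List.nil_append]
  congr 1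
  set ks := generate_key_schedule key with hks
  have hnn := pv_ks_nonneg key
  apply List.ext_getElem
  · simp [PySem.List.length_enumerate]
  · intro k hk1 hk2
    simp only [List.getElem_map, PySem.List.getElem_enumerate, zero_add]
    exact pv_chain _ _ _ _ (Int.natCast_nonneg _)
      (pv_pyGetD_nonneg _ _ hnn) (pv_pyGetD_nonneg _ _ hnn) (pv_pyGetD_nonneg _ _ hnn)
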